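-- pv_equiv track=rewrite | github.com/medu1122/learn | pert_python/bai8 9 10.py | tongChuoiDuongLonNhat
-- ===== SOURCE A (Python) =====
-- def tongChuoiDuongLonNhat(arr):
--     max_sum = 0
--     current_sum = 0
--
--     for i in range(len(arr)):
--         if arr[i] > 0:
--             current_sum += arr[i]
--         else:
--             current_sum = 0
--         if current_sum > max_sum:
--             max_sum = current_sum
--     return max_sum
-- ===== SOURCE B (Python) =====
-- from itertools import groupby
--
--
-- def tongChuoiDuongLonNhat(arr):
--     sums = (sum(g) for k, g in groupby(arr, key=lambda x: x > 0) if k)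
--     return max(sums, default=0)
-- ===== Notes on version B (the rewrite author's own statement) =====
-- stated objective: idiomatic
-- what changed: Replaces the index loop with running/max state by itertools.groupby segmentation: the list is split into maximal runs keyed on x > 0, each positive run is summed, and the answer is max of those sums with default 0.
import Mathlib
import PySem

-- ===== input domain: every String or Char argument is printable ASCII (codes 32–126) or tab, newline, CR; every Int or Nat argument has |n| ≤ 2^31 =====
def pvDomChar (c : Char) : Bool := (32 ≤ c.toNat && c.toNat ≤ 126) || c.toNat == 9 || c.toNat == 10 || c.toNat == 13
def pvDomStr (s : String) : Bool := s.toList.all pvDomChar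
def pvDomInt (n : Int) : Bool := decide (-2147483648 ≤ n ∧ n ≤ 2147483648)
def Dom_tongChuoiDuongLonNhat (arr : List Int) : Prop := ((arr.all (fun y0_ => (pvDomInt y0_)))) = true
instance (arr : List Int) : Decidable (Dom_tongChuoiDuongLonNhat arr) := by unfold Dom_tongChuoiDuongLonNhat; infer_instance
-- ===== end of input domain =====

-- B replaces A's running-sum/max loop by groupby segmentation (sum each maximal positive run,
-- then max with default 0); objective: idiomatic, same O(n) cost.

-- ===== PORT A =====
-- for i in range(len(arr)): state (max_sum, current_sum), updated exactly as A does
def tongChuoiDuongLonNhat (arr : List Int) : Int :=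
  (arr.foldl (fun (p : Int × Int) x =>
      let current_sum := if x > 0 then p.2 + x else (0 : Int)
      let max_sum := if current_sum > p.1 then current_sum else p.1
      (max_sum, current_sum)) ((0 : Int), (0 : Int))).1

-- ===== PORT B =====
-- port of itertools.groupby(arr, key=lambda x: x > 0): maximal runs with their key
def pvGroupRuns : List Int → List (Bool × List Int)
  | [] => []
  | x :: xs =>
    let b := decide (x > 0)
    match pvGroupRuns xs with
    | [] => [(b, [x])]
    | (k, g) :: rest => if b = k then (k, x :: g) :: rest else (b, [x]) :: (k, g) :: rest

-- max(sums, default=0)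
def pvMaxD : List Int → Int
  | [] => 0
  | s :: t => t.foldl max s

def tongChuoiDuongLonNhat_alt (arr : List Int) : Int :=
  pvMaxD ((pvGroupRuns arr).filterMap (fun kg => if kg.1 then some kg.2.sum else none))

-- ===== PRECONDITION & SPEC =====
def Spec_tongChuoiDuongLonNhat (arr : List Int) (out : Int) : Prop := out = tongChuoiDuongLonNhat_alt arr
instance (arr : List Int) (out : Int) : Decidable (Spec_tongChuoiDuongLonNhat arr out) := by unfold Spec_tongChuoiDuongLonNhat; infer_instance

-- ===== CLAIM (what is proved, stated in full; the proofs are below) =====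
def Claim_equal_tongChuoiDuongLonNhat : Prop := ∀ (arr : List Int), Dom_tongChuoiDuongLonNhat arr → Spec_tongChuoiDuongLonNhat arr (tongChuoiDuongLonNhat arr)

-- ===== LEMMAS AND PROOFS =====

-- the leading maximal positive run
def pvLead : List Int → List Int
  | [] => []
  | x :: xs => if x > 0 then x :: pvLead xs else []

-- the list with the leading positive run removed
def pvRest : List Int → List Int
  | [] => []
  | x :: xs => if x > 0 then pvRest xs else x :: xs

def pvSums (arr : List Int) : List Int :=
  (pvGroupRuns arr).filterMap (fun kg => if kg.1 then some kg.2.sum else none)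

theorem alt_def (arr : List Int) : tongChuoiDuongLonNhat_alt arr = pvMaxD (pvSums arr) := rfl

theorem pvLead_sum_nonneg (arr : List Int) : 0 ≤ (pvLead arr).sum := by
  induction arr with
  | nil => simp [pvLead]
  | cons x xs ih =>
    by_cases h : x > 0
    · simp [pvLead, h]; omega
    · simp [pvLead, h]

theorem foldl_max_assoc (t : List Int) : ∀ (a b : Int), t.foldl max (max a b) = max a (t.foldl max b) := by
  induction t with
  | nil => intro a b; simp
  | cons c t ih =>
    intro a b
    simp only [List.foldl_cons, max_assoc]
    exact ih a (max b c)

theorem key_false (y : Int) (ys : List Int) (h : ¬ y > 0) :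
    ∃ g t, pvGroupRuns (y :: ys) = (false, g) :: t := by
  have hb : decide (y > 0) = false := by simp [h]
  cases hgr : pvGroupRuns ys with
  | nil => exact ⟨[y], [], by simp [pvGroupRuns, hgr, hb]⟩
  | cons p rest =>
    obtain ⟨k, g⟩ := p
    cases k with
    | false => exact ⟨y :: g, rest, by simp [pvGroupRuns, hgr, hb]⟩
    | true => exact ⟨[y], (true, g) :: rest, by simp [pvGroupRuns, hgr, hb]⟩

theorem max_collapse (m c L B : Int) (hL : 0 ≤ L) :
    max (max m c) (max (c + L) B) = max m (max (c + L) B) := by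
  simp only [max_def]; split_ifs <;> omega

theorem grHead (xs : List Int) : ∀ (x : Int), 0 < x →
    pvGroupRuns (x :: xs) = (true, x :: pvLead xs) :: pvGroupRuns (pvRest xs) := by
  induction xs with
  | nil => intro x hx; simp [pvGroupRuns, pvLead, pvRest, hx]
  | cons y ys ih =>
    intro x hx
    have hb : decide (x > 0) = true := by simp [hx]
    by_cases hy : y > 0
    · have hrec := ih y hy
      rw [pvGroupRuns, hrec]
      simp only [hb]
      simp [pvLead, pvRest, hy]
    · obtain ⟨g, t, hgt⟩ := key_false y ys hy
      rw [pvGroupRuns, hgt]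
      simp only [hb]
      simp [pvLead, pvRest, hy, hgt]

theorem sums_nonpos (x : Int) (xs : List Int) (h : ¬ x > 0) : pvSums (x :: xs) = pvSums xs := by
  have hb : decide (x > 0) = false := by simp [h]
  cases hgr : pvGroupRuns xs with
  | nil => simp [pvSums, pvGroupRuns, hgr, hb]
  | cons p rest =>
    obtain ⟨k, g⟩ := p
    cases k with
    | false => simp [pvSums, pvGroupRuns, hgr, hb]
    | true => simp [pvSums, pvGroupRuns, hgr, hb]

theorem sums_pos (x : Int) (xs : List Int) (h : 0 < x) :
    pvSums (x :: xs) = (x + (pvLead xs).sum) :: pvSums (pvRest xs) := by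
  simp [pvSums, grHead xs x h]

theorem maxD_cons (s : Int) (t : List Int) (hs : 0 < s) : pvMaxD (s :: t) = max s (pvMaxD t) := by
  cases t with
  | nil => simp [pvMaxD]; omega
  | cons u t' =>
    show (u :: t').foldl max s = max s (t'.foldl max u)
    have : (u :: t').foldl max s = t'.foldl max (max s u) := by simp
    rw [this, foldl_max_assoc]

theorem alt_nonpos (x : Int) (xs : List Int) (h : ¬ x > 0) :
    tongChuoiDuongLonNhat_alt (x :: xs) = tongChuoiDuongLonNhat_alt xs := by
  rw [alt_def, alt_def, sums_nonpos x xs h]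

theorem alt_split (x : Int) (xs : List Int) (h : 0 < x) :
    tongChuoiDuongLonNhat_alt (x :: xs)
      = max (x + (pvLead xs).sum) (tongChuoiDuongLonNhat_alt (pvRest xs)) := by
  rw [alt_def, sums_pos x xs h, maxD_cons _ _ (by have := pvLead_sum_nonneg xs; omega), alt_def]

theorem alt_nonneg (arr : List Int) : 0 ≤ tongChuoiDuongLonNhat_alt arr := by
  induction arr with
  | nil => simp [tongChuoiDuongLonNhat_alt, pvGroupRuns, pvMaxD]
  | cons x xs ih =>
    by_cases h : x > 0
    · rw [alt_split x xs h]
      have := pvLead_sum_nonneg xs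
      have := le_max_left (x + (pvLead xs).sum) (tongChuoiDuongLonNhat_alt (pvRest xs))
      omega
    · rw [alt_nonpos x xs h]; exact ih

theorem alt_head_split (xs : List Int) (m : Int) (_hm : 0 ≤ m) :
    max m (max ((pvLead xs).sum) (tongChuoiDuongLonNhat_alt (pvRest xs)))
      = max m (tongChuoiDuongLonNhat_alt xs) := by
  cases xs with
  | nil =>
    simp [pvLead, pvRest, tongChuoiDuongLonNhat_alt, pvGroupRuns, pvMaxD]
  | cons y ys =>
    by_cases hy : y > 0
    · rw [alt_split y ys hy]
      simp [pvLead, pvRest, hy]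
    · have h0 := alt_nonneg (y :: ys)
      simp only [pvLead, pvRest, if_neg hy, List.sum_nil]
      rw [max_eq_right h0]

theorem main_loop (arr : List Int) : ∀ (m c : Int), 0 ≤ c → c ≤ m →
    (arr.foldl (fun (p : Int × Int) x =>
      let current_sum := if x > 0 then p.2 + x else (0 : Int)
      let max_sum := if current_sum > p.1 then current_sum else p.1
      (max_sum, current_sum)) (m, c)).1
    = max m (max (c + (pvLead arr).sum) (tongChuoiDuongLonNhat_alt (pvRest arr))) := by
  induction arr with
  | nil =>
    intro m c hc hcm
    have h1 : tongChuoiDuongLonNhat_alt [] = 0 := rfl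
    simp only [List.foldl_nil, pvLead, pvRest, List.sum_nil, h1, add_zero]
    simp only [max_def]; split_ifs <;> omega
  | cons x xs ih =>
    intro m c hc hcm
    by_cases hx : x > 0
    · have hstep : (if (c + x) > m then (c + x) else m) = max m (c + x) := by
        simp only [max_def]; split_ifs <;> omega
      simp only [List.foldl_cons, if_pos hx, hstep]
      rw [ih (max m (c + x)) (c + x) (by omega) (le_max_right _ _)]
      simp only [pvLead, pvRest, if_pos hx, List.sum_cons, ← add_assoc]
      exact max_collapse m (c + x) (pvLead xs).sum _ (pvLead_sum_nonneg xs)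
    · have hstep : (if (0 : Int) > m then (0 : Int) else m) = m := by
        have : ¬ ((0 : Int) > m) := by omega
        simp [this]
      simp only [List.foldl_cons, if_neg hx, hstep]
      rw [ih m 0 le_rfl (by omega), zero_add]
      rw [alt_head_split xs m (by omega)]
      simp only [pvLead, pvRest, if_neg hx, List.sum_nil, add_zero]
      rw [alt_nonpos x xs hx]
      simp only [max_def]; split_ifs <;> omega

-- ===== VERDICT (by name: the statement is the Claim_ definition above) =====
theorem tongChuoiDuongLonNhat_spec : Claim_equal_tongChuoiDuongLonNhat := by
  intro arr _
  show tongChuoiDuongLonNhat arr = tongChuoiDuongLonNhat_alt arr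
  unfold tongChuoiDuongLonNhat
  rw [main_loop arr 0 0 le_rfl le_rfl]
  simp only [zero_add]
  rw [alt_head_split arr 0 le_rfl]
  have h0 := alt_nonneg arr
  simp only [max_def]; split_ifs <;> omega
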